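-- pv_equiv track=rewrite | github.com/sree-varma/CodeSignal | Arcade/Intro/digitDegree.py | digitDegree
-- ===== SOURCE A (Python) =====
-- def digitDegree(n):
--
--     if sum([int(i) for i in str(n)])==n:
--         return 0
--     count=1
--
--
--     while n%10>0:
--         n=sum([int(i) for i in str(n)])
--         count+=1
--         if n<10:
--             return count-1
--     return count
-- ===== SOURCE B (Python) =====
-- def digitDegree(n):
--     s = sum(int(c) for c in str(n))
--     if s == n:
--         return 0
--     return 1 + digitDegree(s)
-- ===== Notes on version B (the rewrite author's own statement) =====
-- stated objective: simpler
-- what changed: B replaces A's flat while-loop keyed on a last-digit-positive guard (with its count bookkeeping and early return) by the additive-persistence recursion: compute the digit sum s once, return zero if s equals n, else one plus digitDegree(s).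
-- intended difference: On nonnegative multiples of ten whose digit sum is itself at least ten, A's loop guard (last digit positive) fails immediately and A returns one, while B returns the true number of digit-sum iterations (two or more), which is the intended digit degree. — e.g. on digitDegree(190): A returns 1, B returns 2
import Mathlib
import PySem

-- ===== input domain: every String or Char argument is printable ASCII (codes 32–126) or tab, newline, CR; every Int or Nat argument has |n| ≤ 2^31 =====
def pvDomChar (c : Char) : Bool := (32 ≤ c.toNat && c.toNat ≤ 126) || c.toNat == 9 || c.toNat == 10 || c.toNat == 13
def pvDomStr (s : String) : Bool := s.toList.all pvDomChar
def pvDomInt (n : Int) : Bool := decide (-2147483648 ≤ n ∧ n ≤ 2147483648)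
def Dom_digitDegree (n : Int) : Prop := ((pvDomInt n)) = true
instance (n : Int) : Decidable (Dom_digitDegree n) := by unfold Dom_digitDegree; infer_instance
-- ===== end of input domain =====

-- B replaces A's flat while-loop with n%10-guard by the additive-persistence recursion
-- 1 + digitDegree(digitsum n); simpler, and intentionally correct on trailing-zero inputs
-- where A's guard exits early (see D_ below).


-- ===== PORT A =====
-- int(i) for one character i of str(n): its digit value.  Exact under Pre_ (n ≥ 0, so
-- every character of str(n) is a decimal digit; for n < 0 Python raises ValueError on '-').
def pvCharVal (c : Char) : Int := (c.toNat : Int) - 48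

-- sum([int(i) for i in str(n)])
def pvDigitSum (n : Int) : Int := ((PySem.Int.toStr n).toList.map pvCharVal).sum

-- the while-loop of A; fuel only makes it total (the loop value strictly decreases, so
-- fuel n.natAbs + 1 is never exhausted on the admitted inputs)
def pvLoopA : Nat → Int → Int → Int
  | 0, _, count => count
  | f + 1, n, count =>
    if 0 < PySem.Int.mod n 10 then
      let n' := pvDigitSum n
      let count' := count + 1
      if n' < 10 then count' - 1 else pvLoopA f n' count'
    else count

def digitDegree (n : Int) : Int :=
  if pvDigitSum n = n then 0 else pvLoopA (n.natAbs + 1) n 1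

-- ===== PORT B =====
-- recursion of Source B; fuel only makes it total (the digit sum strictly decreases)
def pvAltGo : Nat → Int → Int
  | 0, _ => 0
  | f + 1, n =>
    let s := pvDigitSum n
    if s = n then 0 else 1 + pvAltGo f s

def digitDegree_alt (n : Int) : Int := pvAltGo (n.natAbs + 1) n

-- ===== PRECONDITION & SPEC =====
-- Pre_ excludes n < 0: there both A and B raise ValueError (int('-') on the sign of str(n)).
def Pre_digitDegree (n : Int) : Prop := 0 ≤ n
instance (n : Int) : Decidable (Pre_digitDegree n) := by unfold Pre_digitDegree; infer_instance
def pvWitness_digitDegree : Int := 19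

-- decimal digit sum of a natural number (input property used by D_; independent of the ports)
def pvSdN (m : Nat) : Nat := (Nat.digits 10 m).sum

-- On nonnegative multiples of ten whose digit sum is itself at least ten, A's loop guard
-- (last digit positive) fails immediately and A returns one, while B returns the true number
-- of digit-sum iterations (two or more), which is the intended digit degree.
def D_digitDegree (n : Int) : Prop := 0 ≤ n ∧ n % 10 = 0 ∧ 10 ≤ pvSdN n.toNat
instance (n : Int) : Decidable (D_digitDegree n) := by unfold D_digitDegree; infer_instance

def Spec_digitDegree (n : Int) (out : Int) : Prop := ¬ D_digitDegree n → out = digitDegree_alt n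
instance (n : Int) (out : Int) : Decidable (Spec_digitDegree n out) := by unfold Spec_digitDegree; infer_instance

def pvDiffWitness_digitDegree : Int := 190
def pvDiffWitnessOut_digitDegree : Int × Int := (1, 2)

-- ===== CLAIM (what is proved, stated in full; the proofs are below) =====
def Claim_unchanged_digitDegree : Prop := ∀ (n : Int), Dom_digitDegree n → Pre_digitDegree n → Spec_digitDegree n (digitDegree n)
def Claim_changed_digitDegree : Prop := Dom_digitDegree (pvDiffWitness_digitDegree) ∧ Pre_digitDegree (pvDiffWitness_digitDegree) ∧ D_digitDegree (pvDiffWitness_digitDegree) ∧ digitDegree (pvDiffWitness_digitDegree) = pvDiffWitnessOut_digitDegree.1 ∧ digitDegree_alt (pvDiffWitness_digitDegree) = pvDiffWitnessOut_digitDegree.2 ∧ pvDiffWitnessOut_digitDegree.1 ≠ pvDiffWitnessOut_digitDegree.2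
def Claim_exact_digitDegree : Prop := ∀ (n : Int), Dom_digitDegree n → Pre_digitDegree n → D_digitDegree n → digitDegree n ≠ digitDegree_alt n

-- ===== LEMMAS AND PROOFS =====

lemma pvSdN_rec (m : Nat) (h : 0 < m) : pvSdN m = m % 10 + pvSdN (m / 10) := by
  unfold pvSdN; rw [Nat.digits_def' (by norm_num) h]; simp

lemma pvSdN_lt (m : Nat) (h : 10 ≤ m) : pvSdN m < m := by
  have := Nat.digit_sum_le 10 (m / 10)
  rw [pvSdN_rec m (by omega)]
  unfold pvSdN
  unfold pvSdN at this
  omega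

lemma pvSdN_small (m : Nat) (h : m < 10) : pvSdN m = m := by
  interval_cases m <;> decide

lemma pvSdN_le (m : Nat) : pvSdN m ≤ m := Nat.digit_sum_le 10 m

lemma pvSdN_le_pow : ∀ (k m : Nat), m < 10 ^ k → pvSdN m ≤ 9 * k := by
  intro k
  induction k with
  | zero => intro m hm; interval_cases m; decide
  | succ k ih =>
    intro m hm
    rcases Nat.eq_zero_or_pos m with h | h
    · subst h; simp [pvSdN]
    · rw [pvSdN_rec m h]
      have h1 : m % 10 < 10 := Nat.mod_lt _ (by norm_num)
      have h2 : m / 10 < 10 ^ k := by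
        rw [Nat.div_lt_iff_lt_mul (by norm_num)]
        calc m < 10 ^ (k+1) := hm
        _ = 10 ^ k * 10 := by ring
      have := ih (m / 10) h2
      omega

lemma pvSdN_mod10 (m : Nat) (h10 : 10 ≤ m) (h90 : m ≤ 90) (hm : m % 10 = 0) : pvSdN m < 10 := by
  rw [pvSdN_rec m (by omega), hm, pvSdN_small (m / 10) (by omega)]
  omega

lemma pvCharVal_digitChar (d : Nat) (h : d < 10) : pvCharVal (Nat.digitChar d) = (d : Int) := by
  interval_cases d <;> rfl

lemma charSum_toDigitsCore : ∀ (f m : Nat) (ds : List Char), m < f →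
    ((Nat.toDigitsCore 10 f m ds).map pvCharVal).sum = (pvSdN m : Int) + (ds.map pvCharVal).sum := by
  intro f
  induction f with
  | zero => intro m ds h; omega
  | succ f ih =>
    intro m ds h
    rw [Nat.toDigitsCore]
    by_cases h0 : m / 10 = 0
    · have hm : m < 10 := by omega
      rw [if_pos h0]
      simp only [List.map_cons, List.sum_cons,
        pvSdN_small m hm, Nat.mod_eq_of_lt hm]
      rw [pvCharVal_digitChar m hm]
    · have hm : 10 ≤ m := by
        by_contra hc
        exact h0 (Nat.div_eq_of_lt (by omega))
      rw [if_neg h0, ih (m / 10) _ (by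
        have : m / 10 < m := Nat.div_lt_self (by omega) (by norm_num)
        omega)]
      simp only [List.map_cons, List.sum_cons,
        pvCharVal_digitChar (m % 10) (Nat.mod_lt _ (by norm_num))]
      rw [pvSdN_rec m (by omega)]
      push_cast
      ring

lemma pvDigitSum_eq (n : Int) (h : 0 ≤ n) : pvDigitSum n = (pvSdN n.toNat : Int) := by
  unfold pvDigitSum
  rw [PySem.Int.toList_toStr]
  unfold PySem.Int.toChars
  rw [if_neg (by omega)]
  unfold Nat.toDigits
  rw [charSum_toDigitsCore (n.toNat + 1) n.toNat [] (Nat.lt_succ_self _)]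
  simp

-- the number of digit-sum iterations to reach a single digit
def pvDeg (m : Nat) : Nat :=
  if h : m < 10 then 0 else 1 + pvDeg (pvSdN m)
  termination_by m
  decreasing_by exact pvSdN_lt m (by omega)

lemma pvDeg_small (m : Nat) (h : m < 10) : pvDeg m = 0 := by
  rw [pvDeg]; simp [h]

lemma pvDeg_rec (m : Nat) (h : 10 ≤ m) : pvDeg m = 1 + pvDeg (pvSdN m) := by
  rw [pvDeg]; simp [Nat.not_lt.mpr h]

lemma pvAltGo_eq : ∀ (f : Nat) (n : Int), 0 ≤ n → n.natAbs < f → pvAltGo f n = (pvDeg n.toNat : Int) := by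
  intro f
  induction f with
  | zero => intro n _ h; omega
  | succ f ih =>
    intro n hn hf
    rw [pvAltGo, pvDigitSum_eq n hn]
    by_cases h10 : n.toNat < 10
    · rw [pvSdN_small n.toNat h10, Int.toNat_of_nonneg hn, if_pos rfl,
        pvDeg_small n.toNat h10]
      rfl
    · have hlt : pvSdN n.toNat < n.toNat := pvSdN_lt n.toNat (by omega)
      rw [if_neg (by omega)]
      rw [ih (pvSdN n.toNat : Int) (by positivity) (by omega)]
      rw [pvDeg_rec n.toNat (by omega)]
      push_cast
      simp

lemma alt_eq (n : Int) (h : 0 ≤ n) : digitDegree_alt n = (pvDeg n.toNat : Int) :=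
  pvAltGo_eq (n.natAbs + 1) n h (Nat.lt_succ_self _)

lemma pvLoopA_eq : ∀ (f : Nat) (m c : Int), 10 ≤ m → m ≤ 90 → m.natAbs < f →
    pvLoopA f m c = c + (pvDeg m.toNat : Int) - 1 := by
  intro f
  induction f with
  | zero => intro m c _ _ h; omega
  | succ f ih =>
    intro m c h10 h90 hf
    have hm0 : (0:Int) ≤ m := by omega
    have hmodeq : PySem.Int.mod m 10 = m % 10 := PySem.Int.mod_eq_emod_of_pos (by norm_num)
    have hN10 : 10 ≤ m.toNat := by omega
    have hN90 : m.toNat ≤ 90 := by omega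
    rw [pvLoopA, hmodeq]
    by_cases hmod : m % 10 = 0
    · rw [if_neg (by omega)]
      have hsd : pvSdN m.toNat < 10 :=
        pvSdN_mod10 m.toNat hN10 hN90 (by omega)
      rw [pvDeg_rec m.toNat hN10, pvDeg_small _ hsd]
      push_cast
      ring
    · have hpos : 0 < m % 10 := by
        have := Int.emod_nonneg m (show (10:Int) ≠ 0 by norm_num)
        omega
      rw [if_pos hpos, pvDigitSum_eq m hm0]
      by_cases hsd : pvSdN m.toNat < 10
      · rw [if_pos (by exact_mod_cast hsd)]
        rw [pvDeg_rec m.toNat hN10, pvDeg_small _ hsd]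
        push_cast
        ring
      · rw [if_neg (by exact_mod_cast hsd)]
        have hlt : pvSdN m.toNat < m.toNat := pvSdN_lt m.toNat hN10
        rw [ih (pvSdN m.toNat : Int) (c + 1) (by omega) (by omega) (by omega)]
        rw [pvDeg_rec m.toNat hN10]
        push_cast
        ring_nf
        simp

-- ===== VERDICT (by name: the statement is the Claim_ definition above) =====
theorem digitDegree_spec : Claim_unchanged_digitDegree := by
  intro n hdom hpre hnD
  have hn : (0:Int) ≤ n := hpre
  have hb := pvDigitSum_eq n hn
  have hdom' : n ≤ 2147483648 := by
    unfold Dom_digitDegree pvDomInt at hdom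
    simp only [decide_eq_true_eq] at hdom
    omega
  rw [alt_eq n hn]
  unfold digitDegree
  by_cases h10 : n.toNat < 10
  · rw [hb, pvSdN_small n.toNat h10, Int.toNat_of_nonneg hn, if_pos rfl,
      pvDeg_small n.toNat h10]
    rfl
  · have hN10 : 10 ≤ n.toNat := by omega
    have hlt := pvSdN_lt n.toNat hN10
    rw [if_neg (by rw [hb]; omega), pvLoopA,
      PySem.Int.mod_eq_emod_of_pos (by norm_num)]
    by_cases hmod : n % 10 = 0
    · rw [if_neg (by omega)]
      have hsd : pvSdN n.toNat < 10 := by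
        by_contra hc
        exact hnD ⟨hn, hmod, by omega⟩
      rw [pvDeg_rec n.toNat hN10, pvDeg_small _ hsd]
      norm_num
    · have hpos : 0 < n % 10 := by
        have := Int.emod_nonneg n (show (10:Int) ≠ 0 by norm_num)
        omega
      rw [if_pos hpos, hb]
      by_cases hsd : pvSdN n.toNat < 10
      · rw [if_pos (by exact_mod_cast hsd), pvDeg_rec n.toNat hN10,
          pvDeg_small _ hsd]
        norm_num
      · rw [if_neg (by exact_mod_cast hsd)]
        have hpow : (10:Nat) ^ 10 = 10000000000 := by norm_num
        have h90 : pvSdN n.toNat ≤ 90 := by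
          have := pvSdN_le_pow 10 n.toNat (by omega)
          omega
        rw [pvLoopA_eq n.natAbs (pvSdN n.toNat : Int) (1 + 1) (by omega) (by omega)
          (by simp; omega)]
        rw [pvDeg_rec n.toNat hN10]
        push_cast
        simp
        ring

theorem digitDegree_changed : Claim_changed_digitDegree := by
  unfold Claim_changed_digitDegree; decide

theorem digitDegree_tight : Claim_exact_digitDegree := by
  intro n hdom hpre hD
  obtain ⟨hn, hmod, hsd⟩ := hD
  have hb := pvDigitSum_eq n hn
  have hN10 : 10 ≤ n.toNat := by
    have := pvSdN_le n.toNat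
    omega
  have hlt := pvSdN_lt n.toNat hN10
  rw [alt_eq n hn]
  unfold digitDegree
  rw [if_neg (by rw [hb]; omega), pvLoopA,
    PySem.Int.mod_eq_emod_of_pos (by norm_num)]
  rw [if_neg (by omega)]
  rw [pvDeg_rec n.toNat hN10, pvDeg_rec (pvSdN n.toNat) hsd]
  push_cast
  omega
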